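-- pv_equiv track=rewrite | github.com/qonyo/foobar-challenge | FindAccessCode/solution.py | solutionz
-- ===== SOURCE A (Python) =====
-- def solutionz(l):
--     c = [0] * len(l)
--     count = 0
--     for i in range(0,len(l)):
--         j=0
--         for j in range(0, i):
--             if l[i] % l[j] == 0:
--                 c[i] = c[i] + 1
--                 count = count + c[j]
--     return count
-- ===== SOURCE B (Python) =====
-- def solutionz(l):
--     count = 0
--     for i in range(len(l)):
--         for j in range(i):
--             for k in range(j):
--                 if l[i] % l[j] == 0 and l[j] % l[k] == 0:
--                     count += 1
--     return count
-- ===== Notes on version B (the rewrite author's own statement) =====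
-- stated objective: simpler
-- what changed: Replaced A's DP array c (per-index divisor counts accumulated into count) by a direct triple-nested loop that counts divisibility-chain triples k<j<i explicitly.
import Mathlib
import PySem

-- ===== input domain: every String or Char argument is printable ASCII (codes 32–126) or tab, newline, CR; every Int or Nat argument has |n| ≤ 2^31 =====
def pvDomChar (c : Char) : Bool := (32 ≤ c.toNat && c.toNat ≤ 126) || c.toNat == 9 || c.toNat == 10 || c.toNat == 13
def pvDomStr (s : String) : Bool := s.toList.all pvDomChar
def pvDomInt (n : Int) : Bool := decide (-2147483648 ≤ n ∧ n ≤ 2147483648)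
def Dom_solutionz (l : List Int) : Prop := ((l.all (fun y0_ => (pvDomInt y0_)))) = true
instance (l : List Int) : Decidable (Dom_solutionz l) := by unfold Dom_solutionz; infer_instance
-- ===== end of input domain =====

-- B replaces A's DP array by a plain triple-nested loop over index triples k<j<i (simpler, no auxiliary state).

-- ===== PORT A =====
-- loop indices i, j are always in range, so l[i], l[j], c[i], c[j] are ported exactly as getD _ _ 0
def solutionz (l : List Int) : Int :=
  (((List.range l.length).foldl (fun (s : List Int × Int) i =>
      (List.range i).foldl (fun (s : List Int × Int) j =>
        if PySem.Int.mod (l.getD i 0) (l.getD j 0) == 0 then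
          (s.1.set i (s.1.getD i 0 + 1), s.2 + s.1.getD j 0)
        else s) s)
    (List.replicate l.length 0, 0)).2)

-- ===== PORT B =====
def solutionz_alt (l : List Int) : Int :=
  (List.range l.length).foldl (fun count i =>
    (List.range i).foldl (fun count j =>
      (List.range j).foldl (fun count k =>
        if (PySem.Int.mod (l.getD i 0) (l.getD j 0) == 0)
            && (PySem.Int.mod (l.getD j 0) (l.getD k 0) == 0) then count + 1
        else count) count) count) 0

-- ===== PRECONDITION & SPEC =====
-- Pre_ excludes exactly the inputs on which Python A raises ZeroDivisionError:
-- a zero anywhere except the last position is used as a divisor l[j] (j < i).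
def Pre_solutionz (l : List Int) : Prop := (0 : Int) ∉ l.dropLast
instance (l : List Int) : Decidable (Pre_solutionz l) := by unfold Pre_solutionz; infer_instance
def pvWitness_solutionz : List Int := [1, 2, 4]

def Spec_solutionz (l : List Int) (out : Int) : Prop := out = solutionz_alt l
instance (l : List Int) (out : Int) : Decidable (Spec_solutionz l out) := by unfold Spec_solutionz; infer_instance

-- ===== CLAIM (what is proved, stated in full; the proofs are below) =====
def Claim_equal_solutionz : Prop := ∀ (l : List Int), Dom_solutionz l → Pre_solutionz l → Spec_solutionz l (solutionz l)

-- ===== LEMMAS AND PROOFS =====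

-- dv l i j : does l[j] divide l[i] (Python's `l[i] % l[j] == 0`)
def dv (l : List Int) (i j : Nat) : Bool := PySem.Int.mod (l.getD i 0) (l.getD j 0) == 0

-- number of j < m with dv l i j
def dcnt (l : List Int) (m i : Nat) : Int := (((List.range m).filter (dv l i)).length : Int)

-- Σ_{j<m, dv i j} dcnt j j
def S (l : List Int) (m i : Nat) : Int :=
  ((List.range m).map (fun j => if dv l i j then dcnt l j j else 0)).sum

def Tsum (l : List Int) (m : Nat) : Int := ((List.range m).map (fun i => S l i i)).sum

-- state of A's array c after the first m outer iterations
def Cst (l : List Int) (m : Nat) : List Int :=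
  (List.range l.length).map (fun j => if j < m then dcnt l j j else 0)

theorem dcnt_succ (l : List Int) (m i : Nat) :
    dcnt l (m+1) i = dcnt l m i + (if dv l i m then 1 else 0) := by
  simp [dcnt, List.range_succ, List.filter_append]
  by_cases h : dv l i m <;> simp [h]

theorem S_succ (l : List Int) (m i : Nat) :
    S l (m+1) i = S l m i + (if dv l i m then dcnt l m m else 0) := by
  simp [S, List.range_succ]

theorem Tsum_succ (l : List Int) (m : Nat) : Tsum l (m+1) = Tsum l m + S l m m := by
  simp [Tsum, List.range_succ]

theorem getD_set_of_lt {c : List Int} {i j : Nat} (hi : i < c.length) (v : Int) :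
    (c.set i v).getD j 0 = if j = i then v else c.getD j 0 := by
  by_cases h : j = i
  · subst h; simp [List.getD, List.getElem?_set_self hi]
  · simp [List.getD, List.getElem?_set_ne (by omega : i ≠ j), h]

theorem set_getD_self {c : List Int} {i : Nat} (hi : i < c.length) :
    c.set i (c.getD i 0) = c := by
  apply List.ext_getElem
  · simp [Cst]
  · intro k hk hk'
    rw [List.getElem_set]
    split
    · rename_i h; subst h; simp [List.getD, List.getElem?_eq_getElem hk']
    · rfl

theorem Cst_length (l : List Int) (m : Nat) : (Cst l m).length = l.length := by simp [Cst]

theorem Cst_getD (l : List Int) (m j : Nat) (hj : j < l.length) :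
    (Cst l m).getD j 0 = if j < m then dcnt l j j else 0 := by
  simp [Cst, List.getD, List.getElem?_map, List.getElem?_range hj]

-- A's inner loop: starting with value a stored at slot i, it sets slot i to a + dcnt l m i
-- and adds S l m i to the count.
theorem innerA (l : List Int) (c : List Int) (cnt a : Int) (i m : Nat)
    (hm : m ≤ i) (hi : i < c.length) (hia : c.getD i 0 = a)
    (hcj : ∀ j < i, c.getD j 0 = dcnt l j j) :
    (List.range m).foldl (fun (s : List Int × Int) j =>
        if dv l i j then
          (s.1.set i (s.1.getD i 0 + 1), s.2 + s.1.getD j 0)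
        else s) (c, cnt)
      = (c.set i (a + dcnt l m i), cnt + S l m i) := by
  induction m with
  | zero =>
      simp only [List.range_zero, List.foldl_nil, dcnt, S, List.range_zero, List.filter_nil,
        List.length_nil, Nat.cast_zero, add_zero, List.map_nil, List.sum_nil]
      rw [← hia, set_getD_self hi]
  | succ m ih =>
      rw [List.range_succ, List.foldl_append, ih (by omega)]
      simp only [List.foldl_cons, List.foldl_nil]
      have hjm : (c.set i (a + dcnt l m i)).getD m 0 = dcnt l m m := by
        rw [getD_set_of_lt hi]
        simp only [if_neg (by omega : ¬ m = i)]
        exact hcj m (by omega)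
      have hii : (c.set i (a + dcnt l m i)).getD i 0 = a + dcnt l m i := by
        rw [getD_set_of_lt hi]; simp
      rw [dcnt_succ, S_succ]
      by_cases h : dv l i m
      · simp only [h, if_true, hjm, hii, List.set_set, add_assoc]
      · simp [h]

theorem Cst_zero (l : List Int) : Cst l 0 = List.replicate l.length 0 := by
  apply List.ext_getElem <;> simp [Cst]

theorem Cst_set (l : List Int) (m : Nat) (hm : m < l.length) :
    (Cst l m).set m (dcnt l m m) = Cst l (m+1) := by
  apply List.ext_getElem
  · simp [Cst]
  · intro k hk hk'
    simp only [Cst, List.length_map, List.length_range] at hk hk' ⊢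
    rw [List.getElem_set]
    by_cases h : m = k
    · subst h; simp [Cst]
    · simp only [if_neg h, List.getElem_map, List.getElem_range]
      by_cases hkm : k < m
      · simp [hkm, Nat.lt_succ_of_lt hkm]
      · have h2 : ¬ k < m + 1 := by omega
        simp [hkm, h2]

theorem outerA (l : List Int) (m : Nat) (hm : m ≤ l.length) :
    (List.range m).foldl (fun (s : List Int × Int) i =>
      (List.range i).foldl (fun (s : List Int × Int) j =>
        if dv l i j then
          (s.1.set i (s.1.getD i 0 + 1), s.2 + s.1.getD j 0)
        else s) s)
      (List.replicate l.length 0, 0)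
      = (Cst l m, Tsum l m) := by
  induction m with
  | zero => simp [Cst_zero, Tsum]
  | succ m ih =>
      rw [List.range_succ, List.foldl_append, ih (by omega)]
      simp only [List.foldl_cons, List.foldl_nil]
      rw [innerA l (Cst l m) (Tsum l m) 0 m m (le_refl m)
            (by rw [Cst_length]; omega)
            (by rw [Cst_getD l m m (by omega)]; simp)
            (fun j hj => by rw [Cst_getD l m j (by omega)]; simp [hj])]
      rw [zero_add, Cst_set l m (by omega), Tsum_succ]

theorem solutionz_eq_Tsum (l : List Int) : solutionz l = Tsum l l.length := by
  exact congrArg Prod.snd (outerA l l.length (le_refl _))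

-- B's innermost loop over k < m
theorem Binnermost (l : List Int) (i j m : Nat) (cnt : Int) :
    (List.range m).foldl (fun count k =>
        if dv l i j && dv l j k then count + 1 else count) cnt
      = cnt + (if dv l i j then dcnt l m j else 0) := by
  induction m with
  | zero => simp [dcnt]
  | succ m ih =>
      rw [List.range_succ, List.foldl_append, ih]
      simp only [List.foldl_cons, List.foldl_nil]
      rw [dcnt_succ]
      by_cases h1 : dv l i j <;> by_cases h2 : dv l j m <;> (simp [h1, h2]; try ring)

theorem Bmid (l : List Int) (i m : Nat) (cnt : Int) :
    (List.range m).foldl (fun count j =>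
      (List.range j).foldl (fun count k =>
        if dv l i j && dv l j k then count + 1 else count) count) cnt
      = cnt + S l m i := by
  induction m with
  | zero => simp [S]
  | succ m ih =>
      rw [List.range_succ, List.foldl_append, ih]
      simp only [List.foldl_cons, List.foldl_nil]
      rw [Binnermost, S_succ, add_assoc]

theorem Bout (l : List Int) (m : Nat) :
    (List.range m).foldl (fun count i =>
      (List.range i).foldl (fun count j =>
        (List.range j).foldl (fun count k =>
          if dv l i j && dv l j k then count + 1 else count) count) count) 0
      = Tsum l m := by
  induction m with
  | zero => simp [Tsum]
  | succ m ih =>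
      rw [List.range_succ, List.foldl_append, ih]
      simp only [List.foldl_cons, List.foldl_nil]
      rw [Bmid, Tsum_succ]

theorem solutionz_alt_eq_Tsum (l : List Int) : solutionz_alt l = Tsum l l.length := by
  exact Bout l l.length

-- ===== VERDICT (by name: the statement is the Claim_ definition above) =====
theorem solutionz_spec : Claim_equal_solutionz := by
  intro l _ _
  unfold Spec_solutionz
  rw [solutionz_eq_Tsum, solutionz_alt_eq_Tsum]
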